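-- pv_equiv track=rewrite | github.com/KrishnanShwetha/matrix_operations | matrix operations project/matrixOperations_2.py | fold_diag
-- ===== SOURCE A (Python) =====
-- def create_uniform_image(height, width, pixel):
--     """ creates and returns a 2-D list of pixels with height rows and
--         width columns in which all of the pixels have the RGB values
--         given by pixel
--         inputs: height and width are non-negative integers
--                 pixel is a 1-D list of RBG values of the form [R,G,B],
--                      where each element is an integer between 0 and 255.
--     """
--     pixels = []
--
--     for r in range(height):
--         row = [pixel] * width
--         pixels += [row]
--
--     return pixels
--
-- def blank_image(height, width):
--     """ creates and returns a 2-D list of pixels with height rows and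
--         width columns in which all of the pixels are green.
--         inputs: height and width are non-negative integers
--     """
--     all_green = create_uniform_image(height, width, [0, 255, 0])
--     return all_green
--
-- def fold_diag(pixels):
--     """Code for the function fold_diag(pixels) that takes the 2-D list pixels
--     containing pixels for an image, and that creates and returns
--     a new 2-D list of pixels for an image in which the original image
--     is “folded” along its diagonal.
--
--     """
--     height=len(pixels)
--     width=len(pixels[0])
--     folded_image=blank_image(height, width)
--     for h in range(height):
--         for w in range(width):
--            folded_image[h][w]=pixels[h][w]
--            if h>w:
--                folded_image[h][w]=[255,255,255]
--     return folded_image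
-- ===== SOURCE B (Python) =====
-- def fold_diag(pixels):
--     width = len(pixels[0])
--     return [[[255, 255, 255]] * min(h, width) + pixels[h][min(h, width):width]
--             for h in range(len(pixels))]
-- ===== Notes on version B (the rewrite author's own statement) =====
-- stated objective: simpler
-- what changed: Per row h, the white/original boundary min(h,width) is computed in closed form and the row is built once as replicate+slice, instead of allocating a green blank image and overwriting every cell with a per-cell h>w test.
import Mathlib
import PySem

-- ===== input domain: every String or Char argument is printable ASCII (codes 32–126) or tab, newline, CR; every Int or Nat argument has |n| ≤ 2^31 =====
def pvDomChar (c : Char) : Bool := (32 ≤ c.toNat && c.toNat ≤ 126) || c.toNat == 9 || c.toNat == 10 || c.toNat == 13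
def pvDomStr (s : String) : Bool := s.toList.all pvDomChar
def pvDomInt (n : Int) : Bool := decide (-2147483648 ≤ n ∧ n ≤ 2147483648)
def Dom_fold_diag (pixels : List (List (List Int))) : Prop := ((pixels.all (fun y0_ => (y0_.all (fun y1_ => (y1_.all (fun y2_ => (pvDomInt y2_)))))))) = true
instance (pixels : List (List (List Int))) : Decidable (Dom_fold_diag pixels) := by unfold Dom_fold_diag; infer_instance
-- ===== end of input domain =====

-- B builds each row once as replicate + slice with the closed-form boundary min(h,width),
-- instead of A's blank green image overwritten cell by cell with a per-cell h>w test (objective: simpler).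

-- ===== PORT A =====
def create_uniform_image (height width : Nat) (pixel : List Int) : List (List (List Int)) :=
  (List.range height).foldl (fun pixels _r => pixels ++ [List.replicate width pixel]) []

def blank_image (height width : Nat) : List (List (List Int)) :=
  create_uniform_image height width [0, 255, 0]

-- folded_image[h][w] = v  (Python's in-place assignment on the 2-D list)
def setCell (img : List (List (List Int))) (h w : Nat) (v : List Int) : List (List (List Int)) :=
  img.set h ((img.getD h []).set w v)

def fold_diag (pixels : List (List (List Int))) : List (List (List Int)) :=
  let height := pixels.length
  let width := ((PySem.List.pyGet? pixels 0).getD []).length   -- pixels[0]: raises on [] — excluded by Pre_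
  let folded0 := blank_image height width
  (List.range height).foldl (fun folded h =>
    (List.range width).foldl (fun folded w =>
      let folded := setCell folded h w ((pixels.getD h []).getD w [])  -- pixels[h][w]: in range under Pre_
      if (h : Int) > (w : Int) then setCell folded h w [255, 255, 255] else folded)
      folded) folded0

-- ===== PORT B =====
def fold_diag_alt (pixels : List (List (List Int))) : List (List (List Int)) :=
  let width := ((PySem.List.pyGet? pixels 0).getD []).length
  (List.range pixels.length).map (fun h =>
    List.replicate (min h width) [255, 255, 255] ++
      PySem.List.slice (pixels.getD h []) (some ((min h width : Nat) : Int)) (some ((width : Nat) : Int)))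

-- ===== PRECONDITION & SPEC =====
-- Pre_ excludes exactly the inputs where A raises IndexError: the empty list (pixels[0])
-- and ragged inputs with some row shorter than len(pixels[0]) (pixels[h][w]).
def Pre_fold_diag (pixels : List (List (List Int))) : Prop :=
  pixels ≠ [] ∧ ∀ r ∈ pixels, (pixels.headD []).length ≤ r.length
instance (pixels : List (List (List Int))) : Decidable (Pre_fold_diag pixels) := by
  unfold Pre_fold_diag; infer_instance

def pvWitness_fold_diag : List (List (List Int)) :=
  [[[1, 2, 3], [4, 5, 6]], [[7, 8, 9], [10, 11, 12]]]

def Spec_fold_diag (pixels : List (List (List Int))) (out : List (List (List Int))) : Prop := out = fold_diag_alt pixels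
instance (pixels : List (List (List Int))) (out : List (List (List Int))) : Decidable (Spec_fold_diag pixels out) := by unfold Spec_fold_diag; infer_instance

-- ===== CLAIM (what is proved, stated in full; the proofs are below) =====
def Claim_equal_fold_diag : Prop := ∀ (pixels : List (List (List Int))), Dom_fold_diag pixels → Pre_fold_diag pixels → Spec_fold_diag pixels (fold_diag pixels)

-- ===== LEMMAS AND PROOFS =====

theorem create_uniform_image_eq (height width : Nat) (pixel : List Int) :
    create_uniform_image height width pixel = List.replicate height (List.replicate width pixel) := by
  unfold create_uniform_image
  induction height with
  | zero => simp
  | succ n ih =>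
      rw [List.range_succ, List.foldl_append]
      simp [ih, List.replicate_succ' (n := n)]

-- the two assignments of A's inner body collapse to one set of the final value
theorem getD_set_self {α : Type} (l : List α) (i : Nat) (v d : α) (hi : i < l.length) :
    (l.set i v).getD i d = v := by
  rw [List.getD_eq_getElem _ d (by simpa using hi)]
  simp

theorem step_eq (P : Nat → List Int) (h w : Nat) (img : List (List (List Int))) :
    (let folded := setCell img h w (P w);
     if (h : Int) > (w : Int) then setCell folded h w [255, 255, 255] else folded) =
    img.set h ((img.getD h []).set w (if (h : Int) > (w : Int) then [255, 255, 255] else P w)) := by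
  by_cases hc : (h : Int) > (w : Int)
  · simp only [hc, if_pos, setCell]
    by_cases hh : h < img.length
    · rw [getD_set_self _ _ _ _ hh, List.set_set, List.set_set]
    · have hle : img.length ≤ h := by omega
      simp [List.set_eq_of_length_le hle]
  · simp only [hc, setCell, if_false]

-- A's inner loop over w only rewrites row h of the image
theorem inner_eq (P : Nat → List Int) (h : Nat) :
    ∀ (ws : List Nat) (img : List (List (List Int))), h < img.length →
      ws.foldl (fun folded w =>
        let folded := setCell folded h w (P w)
        if (h : Int) > (w : Int) then setCell folded h w [255, 255, 255] else folded) img =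
      img.set h (ws.foldl (fun r w =>
        r.set w (if (h : Int) > (w : Int) then [255, 255, 255] else P w)) (img.getD h [])) := by
  intro ws
  induction ws with
  | nil =>
      intro img hh
      simp only [List.foldl_nil]
      rw [List.getD_eq_getElem _ [] (by simpa using hh), List.set_getElem_self hh]
  | cons w ws ih =>
      intro img hh
      simp only [List.foldl_cons]
      rw [step_eq P h w img, ih _ (by simpa using hh)]
      rw [getD_set_self _ _ _ _ hh, List.set_set]

-- filling slot i with F i (current slot i) for each i < n, left to right
theorem foldl_set_range {α : Type} (F : Nat → α → α) (d : α) :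
    ∀ (n : Nat) (r : List α), n ≤ r.length →
      (List.range n).foldl (fun r i => r.set i (F i (r.getD i d))) r =
        (List.range n).map (fun i => F i (r.getD i d)) ++ r.drop n := by
  intro n
  induction n with
  | zero => simp
  | succ m ih =>
      intro r hr
      rw [List.range_succ, List.foldl_append, List.map_append, ih r (by omega)]
      simp only [List.foldl_cons, List.foldl_nil, List.map_cons, List.map_nil]
      have hlen : ((List.range m).map (fun i => F i (r.getD i d))).length = m := by simp
      have hm : m < r.length := by omega
      have hdrop : r.drop m = r[m] :: r.drop (m + 1) := List.drop_eq_getElem_cons hm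
      have hgd : ((List.range m).map (fun i => F i (r.getD i d)) ++ r.drop m).getD m d = r.getD m d := by
        rw [List.getD_append_right _ _ _ _ (by omega), hlen, Nat.sub_self, hdrop]
        simp only [List.getD_cons_zero]
        rw [List.getD_eq_getElem _ d (by simpa using hr)]
      rw [hgd, List.set_append_right _ _ (by omega), hlen, Nat.sub_self, hdrop,
        List.set_cons_zero]
      simp

-- the row A computes for index h equals the row B builds
theorem row_eq (row : List (List Int)) (h width : Nat) (hw : width ≤ row.length) :
    (List.range width).map (fun (w : Nat) => if (h : Int) > (w : Int) then ([255, 255, 255] : List Int) else row.getD w []) =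
      List.replicate (min h width) [255, 255, 255] ++
        PySem.List.slice row (some ((min h width : Nat) : Int)) (some ((width : Nat) : Int)) := by
  rw [PySem.List.slice_natCast]
  apply List.ext_getElem
  · simp; omega
  · intro i h1 h2
    have hiw : i < width := by simpa using h1
    by_cases hih : i < min h width
    · rw [List.getElem_append_left (by simpa using hih)]
      simp only [List.getElem_map, List.getElem_range, List.getElem_replicate]
      rw [if_pos (by omega)]
    · have hlenrep : (List.replicate (min h width) ([255, 255, 255] : List Int)).length = min h width := by simp
      rw [List.getElem_append_right (by omega)]
      simp only [List.getElem_map, List.getElem_range, hlenrep, List.getElem_take, List.getElem_drop]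
      have hidx : min h width + (i - min h width) = i := by omega
      rw [if_neg (by omega)]
      simp only [hidx]
      rw [List.getD_eq_getElem _ _ (by omega)]

-- ===== VERDICT (by name: the statement is the Claim_ definition above) =====
theorem fold_diag_spec : Claim_equal_fold_diag := by
  intro pixels _hdom hpre
  obtain ⟨hne, hrows⟩ := hpre
  unfold Spec_fold_diag fold_diag fold_diag_alt
  simp only []
  set height := pixels.length with hheight
  set width := ((PySem.List.pyGet? pixels 0).getD []).length with hwidth
  have hwid : ∀ r ∈ pixels, width ≤ r.length := by
    intro r hr
    have hhd : (PySem.List.pyGet? pixels 0).getD [] = pixels.headD [] := by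
      cases pixels with
      | nil => simp at hne
      | cons a l => simp [PySem.List.pyGet?, PySem.List.pyIdx?]
    rw [hwidth, hhd]; exact hrows r hr
  have hblank : blank_image height width = List.replicate height (List.replicate width ([0, 255, 0] : List Int)) :=
    create_uniform_image_eq height width _
  -- rewrite A's double loop: each outer step sets row h
  have houter : (List.range height).foldl (fun folded h =>
      (List.range width).foldl (fun folded w =>
        let folded := setCell folded h w ((pixels.getD h []).getD w [])
        if (h : Int) > (w : Int) then setCell folded h w [255, 255, 255] else folded)
        folded) (blank_image height width) =
      (List.range height).foldl (fun img h =>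
        img.set h ((List.range width).foldl (fun r w =>
          r.set w (if (h : Int) > (w : Int) then [255, 255, 255] else (pixels.getD h []).getD w []))
          (img.getD h []))) (blank_image height width) := by
    have hlenb : (blank_image height width).length = height := by rw [hblank]; simp
    have : ∀ (hs : List Nat) (img : List (List (List Int))), (∀ x ∈ hs, x < img.length) →
        hs.foldl (fun folded h =>
          (List.range width).foldl (fun folded w =>
            let folded := setCell folded h w ((pixels.getD h []).getD w [])
            if (h : Int) > (w : Int) then setCell folded h w [255, 255, 255] else folded)
            folded) img =
        hs.foldl (fun img h =>
          img.set h ((List.range width).foldl (fun r w =>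
            r.set w (if (h : Int) > (w : Int) then [255, 255, 255] else (pixels.getD h []).getD w []))
            (img.getD h []))) img := by
      intro hs
      induction hs with
      | nil => intro img _; rfl
      | cons h hs ih =>
          intro img hmem
          simp only [List.foldl_cons]
          rw [inner_eq _ h (List.range width) img (hmem h (by simp))]
          exact ih _ (by intro x hx; simpa using hmem x (by simp [hx]))
    exact this (List.range height) _ (by intro x hx; rw [hlenb]; simpa using hx)
  rw [houter]
  -- the outer loop is a fill of rows 0..height-1
  have hfill : (List.range height).foldl (fun img h =>
      img.set h ((List.range width).foldl (fun r w =>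
        r.set w (if (h : Int) > (w : Int) then [255, 255, 255] else (pixels.getD h []).getD w []))
        (img.getD h []))) (blank_image height width) =
      (List.range height).map (fun h =>
        (List.range width).foldl (fun r w =>
          r.set w (if (h : Int) > (w : Int) then [255, 255, 255] else (pixels.getD h []).getD w []))
          ((blank_image height width).getD h [])) ++ (blank_image height width).drop height :=
    foldl_set_range (fun h row => (List.range width).foldl (fun r w =>
      r.set w (if (h : Int) > (w : Int) then [255, 255, 255] else (pixels.getD h []).getD w [])) row)
      [] height (blank_image height width) (by rw [hblank]; simp)
  rw [hfill]
  have hdropb : (blank_image height width).drop height = [] := by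
    rw [hblank]; simp
  rw [hdropb, List.append_nil]
  apply List.map_congr_left
  intro h hh
  have hhh : h < height := by simpa using hh
  have hrowb : (blank_image height width).getD h [] = List.replicate width [0, 255, 0] := by
    rw [hblank, List.getD_eq_getElem _ [] (by simpa using hhh), List.getElem_replicate]
  rw [hrowb]
  -- the inner loop fills slots 0..width-1 of the green row
  have hrowfill : (List.range width).foldl (fun r w =>
      r.set w (if (h : Int) > (w : Int) then [255, 255, 255] else (pixels.getD h []).getD w []))
      (List.replicate width [0, 255, 0]) =
      (List.range width).map (fun (w : Nat) =>
        if (h : Int) > (w : Int) then [255, 255, 255] else (pixels.getD h []).getD w []) ++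
        (List.replicate width ([0, 255, 0] : List Int)).drop width :=
    foldl_set_range (fun (w : Nat) _ =>
      if (h : Int) > (w : Int) then [255, 255, 255] else (pixels.getD h []).getD w [])
      [] width (List.replicate width [0, 255, 0]) (by simp)
  rw [hrowfill]
  simp only [List.drop_replicate, Nat.sub_self, List.replicate_zero, List.append_nil]
  have hmem : pixels.getD h [] ∈ pixels := by
    rw [List.getD_eq_getElem _ [] (by simpa using hhh)]
    exact List.getElem_mem _
  exact row_eq (pixels.getD h []) h width (hwid _ hmem)
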